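-- pv_equiv track=rewrite | github.com/posl/comment_recommendation | script/split_gen/4_time/zh/201_C/6.py | solve
-- ===== SOURCE A (Python) =====
-- def solve(s):
--     result = 0
--     for i in range(10000):
--         i = str(i).zfill(4)
--         flag = True
--         for j in range(10):
--             if s[j] == 'o' and str(j) not in i:
--                 flag = False
--                 break
--             if s[j] == 'x' and str(j) in i:
--                 flag = False
--                 break
--         if flag:
--             result += 1
--     return result
-- ===== SOURCE B (Python) =====
-- def solve(s):
--     # inclusion-exclusion: count 4-digit strings (with leading zeros) that
--     # contain every required digit and avoid every forbidden one.
--     r = 0  # number of required digits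
--     a = 0  # number of allowed digits
--     for j in range(10):
--         if s[j] == 'o':
--             r += 1
--         if s[j] != 'x':
--             a += 1
--     total = 0
--     sign = 1
--     c = 1  # running binomial coefficient C(r, k)
--     for k in range(r + 1):
--         total += sign * c * (a - k) ** 4
--         sign = -sign
--         c = c * (r - k) // (k + 1)
--     return total
-- ===== Notes on version B (the rewrite author's own statement) =====
-- stated objective: faster
-- what changed: B replaces A's brute-force scan of all 10000 zero-padded 4-digit strings (each checked against the 10 marks) by a closed-form inclusion-exclusion sum over the required digits: sum_k (-1)^k C(r,k) (a-k)^4, where r counts positions marked required and a counts positions not marked forbidden.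
-- outside the precondition, e.g. on solve('ooooooooo'): A returns 0, B raises IndexError
import Mathlib
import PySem

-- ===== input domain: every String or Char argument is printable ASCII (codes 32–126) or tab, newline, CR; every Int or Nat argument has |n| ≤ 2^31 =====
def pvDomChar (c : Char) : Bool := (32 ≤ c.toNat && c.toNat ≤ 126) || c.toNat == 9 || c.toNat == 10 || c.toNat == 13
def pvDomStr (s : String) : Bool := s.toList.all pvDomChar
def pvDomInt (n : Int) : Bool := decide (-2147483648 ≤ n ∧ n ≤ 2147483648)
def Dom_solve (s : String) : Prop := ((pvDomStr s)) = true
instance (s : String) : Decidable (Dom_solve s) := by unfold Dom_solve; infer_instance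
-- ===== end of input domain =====

-- B replaces A's brute-force scan of all 10000 zero-padded 4-digit strings by a
-- closed-form inclusion-exclusion sum over the required digits (objective: faster,
-- constant-factor: 10 loop iterations instead of 10000·10).

-- ===== PORT A =====
-- str(i).zfill(4): hand port, exact for the nonnegative numbers of A's loop (no sign handling needed)
def pyZfill4 (cs : List Char) : List Char := List.replicate (4 - cs.length) '0' ++ cs

-- the inner `for j in range(10)` of A, with its two `break` branches (returning false)
def solveInner (s : String) (iS : List Char) : List Int → Bool
  | [] => true
  | j :: js =>
    match PySem.Str.pyGet? s j with
    | none => false   -- IndexError: unreachable under Pre_solve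
    | some c =>
      if c == 'o' && !(PySem.Chars.isIn (PySem.Int.toChars j) iS) then false
      else if c == 'x' && PySem.Chars.isIn (PySem.Int.toChars j) iS then false
      else solveInner s iS js

def solve (s : String) : Int :=
  (PySem.List.pyRange 0 10000 1).foldl (fun result i =>
    let iS := pyZfill4 (PySem.Int.toChars i)
    if solveInner s iS (PySem.List.pyRange 0 10 1) then result + 1 else result) 0

-- ===== PORT B =====
def solve_alt (s : String) : Int :=
  let ra := (PySem.List.pyRange 0 10 1).foldl
    (fun (st : Int × Int) j =>
      (if PySem.Str.pyGet? s j = some 'o' then st.1 + 1 else st.1,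
       if ¬ PySem.Str.pyGet? s j = some 'x' then st.2 + 1 else st.2)) (0, 0)
  let tsc := (PySem.List.pyRange 0 (ra.1 + 1) 1).foldl
    (fun (st : Int × Int × Int) k =>
      (st.1 + st.2.1 * st.2.2 * (ra.2 - k) ^ (4 : Nat),
       -st.2.1,
       PySem.Int.floordiv (st.2.2 * (ra.1 - k)) (k + 1))) (0, 1, 1)
  tsc.1

-- ===== PRECONDITION & SPEC =====
-- Pre_: both programs index s[0..9]; on strings shorter than 10 A raises IndexError on almost
-- all of them and returns (0) only accidentally, when every 4-digit number happens to violate a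
-- constraint within the first len(s) positions; B uniformly raises IndexError there.
def Pre_solve (s : String) : Prop := 10 ≤ s.toList.length
instance (s : String) : Decidable (Pre_solve s) := by unfold Pre_solve; infer_instance
def pvWitness_solve : String := "oxoxoxoxox"

def Spec_solve (s : String) (out : Int) : Prop := out = solve_alt s
instance (s : String) (out : Int) : Decidable (Spec_solve s out) := by unfold Spec_solve; infer_instance

-- ===== CLAIM (what is proved, stated in full; the proofs are below) =====
def Claim_equal_solve : Prop := ∀ (s : String), Dom_solve s → Pre_solve s → Spec_solve s (solve s)

-- ===== LEMMAS AND PROOFS =====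

/-! ### decimal digits of numbers below 10000 -/

def digitsRec (n : Nat) : List Char :=
  if n < 10 then [Nat.digitChar n] else digitsRec (n / 10) ++ [Nat.digitChar (n % 10)]
  decreasing_by exact Nat.div_lt_self (by omega) (by omega)

theorem toDigitsCore_eq_digitsRec (f : Nat) : ∀ (n : Nat) (l : List Char), n < 10 ^ f →
    Nat.toDigitsCore 10 (f + 1) n l = digitsRec n ++ l := by
  induction f with
  | zero =>
    intro n l h
    have hn : n = 0 := by omega
    subst hn
    rw [show Nat.toDigitsCore 10 1 0 l = '0' :: l from rfl, digitsRec]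
    norm_num
    rfl
  | succ f ih =>
    intro n l h
    have hred : Nat.toDigitsCore 10 (f + 1 + 1) n l
        = if n / 10 = 0 then Nat.digitChar (n % 10) :: l
          else Nat.toDigitsCore 10 (f + 1) (n / 10) (Nat.digitChar (n % 10) :: l) := rfl
    by_cases hn : n / 10 = 0
    · have h10 : n < 10 := by omega
      rw [hred, if_pos hn, digitsRec, if_pos h10, Nat.mod_eq_of_lt h10]
      rfl
    · have hstep : Nat.toDigitsCore 10 (f + 1 + 1) n l
          = Nat.toDigitsCore 10 (f + 1) (n / 10) (Nat.digitChar (n % 10) :: l) := by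
        rw [hred, if_neg hn]
      rw [hstep, ih (n / 10) _ (by
        have : n < 10 * 10 ^ f := by rw [← pow_succ']; exact h
        omega)]
      have h10 : ¬ n < 10 := by omega
      conv_rhs => rw [digitsRec]
      rw [if_neg h10, List.append_assoc]
      rfl

theorem toChars_natCast (n : Nat) : PySem.Int.toChars (n : Int) = digitsRec n := by
  have h : n < 10 ^ n + 1 := by
    have := Nat.lt_two_pow_self (n := n)
    have h2 : 2 ^ n ≤ 10 ^ n := Nat.pow_le_pow_left (by omega) n
    omega
  have hlt : n < 10 ^ n := by
    rcases Nat.eq_zero_or_pos n with h0 | h0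
    · subst h0; simp
    · calc n < 2 ^ n := Nat.lt_two_pow_self
        _ ≤ 10 ^ n := Nat.pow_le_pow_left (by omega) n
  simp [PySem.Int.toChars, Nat.toDigits]
  rw [toDigitsCore_eq_digitsRec n n [] hlt]
  simp

def digs (n : Nat) : List Nat := [n / 1000 % 10, n / 100 % 10, n / 10 % 10, n % 10]

theorem digitsRec_lt10 (n : Nat) (h : n < 10) : digitsRec n = [Nat.digitChar n] := by
  rw [digitsRec]; simp [h]

theorem digitsRec_ge10 (n : Nat) (h : ¬ n < 10) :
    digitsRec n = digitsRec (n / 10) ++ [Nat.digitChar (n % 10)] := by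
  rw [digitsRec]; simp [h]

theorem zfill_digitsRec (n : Nat) (h : n < 10000) :
    pyZfill4 (digitsRec n) = (digs n).map Nat.digitChar := by
  by_cases h1 : n < 10
  · rw [digitsRec_lt10 n h1]
    have d0 : n / 1000 % 10 = 0 := by omega
    have d1 : n / 100 % 10 = 0 := by omega
    have d2 : n / 10 % 10 = 0 := by omega
    have d3 : n % 10 = n := by omega
    simp [pyZfill4, digs, d0, d1, d2, d3, List.replicate, Nat.digitChar]
  · by_cases h2 : n < 100
    · rw [digitsRec_ge10 n h1, digitsRec_lt10 _ (by omega)]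
      have d0 : n / 1000 % 10 = 0 := by omega
      have d1 : n / 100 % 10 = 0 := by omega
      have d2 : n / 10 % 10 = n / 10 := by omega
      simp [pyZfill4, digs, d0, d1, d2, List.replicate, Nat.digitChar]
    · by_cases h3 : n < 1000
      · rw [digitsRec_ge10 n h1, digitsRec_ge10 _ (by omega), digitsRec_lt10 _ (by omega)]
        have d0 : n / 1000 % 10 = 0 := by omega
        have e1 : n / 10 / 10 = n / 100 % 10 := by omega
        simp [pyZfill4, digs, d0, e1, Nat.digitChar]
      · rw [digitsRec_ge10 n h1, digitsRec_ge10 _ (by omega), digitsRec_ge10 _ (by omega),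
          digitsRec_lt10 _ (by omega)]
        have e1 : n / 10 / 10 / 10 = n / 1000 % 10 := by omega
        have e2 : n / 10 / 10 % 10 = n / 100 % 10 := by omega
        simp [pyZfill4, digs, e1, e2]

theorem digitChar_inj (a b : Nat) (ha : a < 10) (hb : b < 10)
    (h : Nat.digitChar a = Nat.digitChar b) : a = b := by
  have key : ∀ a b : Fin 10, Nat.digitChar a.val = Nat.digitChar b.val → a = b := by decide
  have := key ⟨a, ha⟩ ⟨b, hb⟩ h
  exact congrArg Fin.val this

theorem isIn_digit (j n : Nat) (hj : j < 10) (hn : n < 10000) :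
    PySem.Chars.isIn (PySem.Int.toChars (j : Int)) (pyZfill4 (PySem.Int.toChars (n : Int)))
      = decide (j ∈ digs n) := by
  rw [toChars_natCast, toChars_natCast, digitsRec_lt10 j hj, zfill_digitsRec n hn]
  have hd : ∀ x ∈ digs n, x < 10 := by
    intro x hx
    simp [digs] at hx
    omega
  by_cases hm : j ∈ digs n
  · have : Nat.digitChar j ∈ (digs n).map Nat.digitChar := List.mem_map_of_mem hm
    have hin : [Nat.digitChar j] <:+: (digs n).map Nat.digitChar :=
      (List.singleton_infix_iff _ _).mpr this
    simp [hm, (PySem.Chars.isIn_iff_infix _ _).mpr hin]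
  · have hni : ¬ Nat.digitChar j ∈ (digs n).map Nat.digitChar := by
      intro hc
      rcases List.mem_map.mp hc with ⟨x, hx, hxe⟩
      exact hm (digitChar_inj x j (hd x hx) hj hxe ▸ hx)
    have : PySem.Chars.isIn [Nat.digitChar j] ((digs n).map Nat.digitChar) = false := by
      rcases Bool.eq_false_or_eq_true (PySem.Chars.isIn [Nat.digitChar j] ((digs n).map Nat.digitChar)) with h | h
      · exact absurd ((List.singleton_infix_iff _ _).mp ((PySem.Chars.isIn_iff_infix _ _).mp h)) hni
      · exact h
    simp [hm, this]

/-! ### the per-number check of A as a Boolean predicate -/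

def pcheck (c : Char) (m : Bool) : Bool := !(c == 'o' && !m) && !(c == 'x' && m)

def cls (s : String) (j : Nat) : Char := s.toList.getD j ' '

def PnA (s : String) (n : Nat) : Bool :=
  (List.range 10).all (fun j => pcheck (cls s j) (decide (j ∈ digs n)))

theorem solveInner_eq_all (s : String) (iS : List Char) (L : List Int) :
    solveInner s iS L = L.all (fun j =>
      match PySem.Str.pyGet? s j with
      | none => false
      | some c => pcheck c (PySem.Chars.isIn (PySem.Int.toChars j) iS)) := by
  induction L with
  | nil => simp [solveInner]
  | cons j js ih =>
    cases hg : PySem.Str.pyGet? s j with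
    | none =>
      rw [show PySem.Str.pyGet? s j = PySem.List.pyGet? s.toList j from rfl] at hg
      simp [solveInner, hg]
    | some c =>
      rw [show PySem.Str.pyGet? s j = PySem.List.pyGet? s.toList j from rfl] at hg
      cases hc : (c == 'o') <;> cases hx : (c == 'x') <;>
        cases hm : PySem.Chars.isIn (PySem.Int.toChars j) iS <;>
        simp [solveInner, hg, pcheck, hc, hx, hm, ih]

theorem pyGet?_cls (s : String) (h : 10 ≤ s.toList.length) (j : Nat) (hj : j < 10) :
    PySem.Str.pyGet? s (j : Int) = some (cls s j) := by
  have hj' : j < s.toList.length := by omega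
  rw [show PySem.Str.pyGet? s (j : Int) = PySem.List.pyGet? s.toList (j : Int) from rfl,
    PySem.List.pyGet?_natCast, List.getElem?_eq_getElem hj']
  simp [cls, List.getD, List.getElem?_eq_getElem hj']

theorem flag_eq (s : String) (h : 10 ≤ s.toList.length) (n : Nat) (hn : n < 10000) :
    solveInner s (pyZfill4 (PySem.Int.toChars (n : Int))) (PySem.List.pyRange 0 10 1) = PnA s n := by
  rw [solveInner_eq_all, show ((10 : Int)) = ((10 : Nat) : Int) by norm_num,
    PySem.List.pyRange_zero_natCast, List.all_map]
  have he : ∀ j ∈ List.range 10,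
      ((fun (j : Int) => match PySem.Str.pyGet? s j with
        | none => false
        | some c => pcheck c (PySem.Chars.isIn (PySem.Int.toChars j)
            (pyZfill4 (PySem.Int.toChars (n : Int))))) ∘ (fun (k : Nat) => (k : Int))) j
        = pcheck (cls s j) (decide (j ∈ digs n)) := by
    intro j hj
    have hj10 : j < 10 := List.mem_range.mp hj
    simp only [Function.comp, pyGet?_cls s h j hj10]
    rw [isIn_digit j n hj10 hn]
  unfold PnA
  refine Bool.eq_iff_iff.mpr ?_
  simp only [List.all_eq_true]
  exact ⟨fun H j hj => (he j hj) ▸ H j hj, fun H j hj => (he j hj).symm ▸ H j hj⟩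

theorem solve_eq_countP (s : String) (h : 10 ≤ s.toList.length) :
    solve s = ((List.range 10000).countP (PnA s) : Int) := by
  simp only [solve]
  rw [show ((10000 : Int)) = ((10000 : Nat) : Int) by norm_num,
    PySem.List.pyRange_zero_natCast, List.foldl_map]
  have hcong : ∀ (acc : Int) (k : Nat), k ∈ List.range 10000 →
      (if solveInner s (pyZfill4 (PySem.Int.toChars (k : Int))) (PySem.List.pyRange 0 10 1) = true
        then acc + 1 else acc)
      = (if PnA s k = true then acc + 1 else acc) := by
    intro acc k hk
    rw [flag_eq s h k (List.mem_range.mp hk)]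
  rw [PySem.List.foldl_congr_mem _ _ _ _ hcong, PySem.List.foldl_if_add_one, zero_add]

/-! ### from numbers below 10000 to functions Fin 4 → Fin 10 -/

def Rset (s : String) : Finset (Fin 10) := Finset.univ.filter (fun j => cls s j.val = 'o')
def Aset (s : String) : Finset (Fin 10) := Finset.univ.filter (fun j => cls s j.val ≠ 'x')

def digFun (n : Nat) : Fin 4 → Fin 10 := fun p => ⟨n / 10 ^ (3 - p.val) % 10, Nat.mod_lt _ (by norm_num)⟩

theorem mem_digs_iff (n : Nat) (j : Fin 10) : (j : Nat) ∈ digs n ↔ ∃ p : Fin 4, digFun n p = j := by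
  constructor
  · intro hm
    simp only [digs, List.mem_cons, List.not_mem_nil, or_false] at hm
    rcases hm with hv | hv | hv | hv
    · exact ⟨0, Fin.ext (by norm_num [digFun]; omega)⟩
    · exact ⟨1, Fin.ext (by norm_num [digFun]; omega)⟩
    · exact ⟨2, Fin.ext (by norm_num [digFun]; omega)⟩
    · exact ⟨3, Fin.ext (by norm_num [digFun]; omega)⟩
  · rintro ⟨p, rfl⟩
    fin_cases p <;> simp [digFun, digs]

theorem pcheck_iff (c : Char) (m : Bool) :
    pcheck c m = true ↔ ((c = 'o' → m = true) ∧ (c = 'x' → m = false)) := by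
  cases m <;> simp [pcheck]

theorem PnA_iff (s : String) (n : Nat) :
    PnA s n = true ↔ ((∀ p, digFun n p ∈ Aset s) ∧ Rset s ⊆ Finset.image (digFun n) Finset.univ) := by
  unfold PnA
  simp only [List.all_eq_true, List.mem_range]
  constructor
  · intro H
    constructor
    · intro p
      simp only [Aset, Finset.mem_filter, Finset.mem_univ, true_and]
      intro hx
      have hmem : ((digFun n p : Fin 10) : Nat) ∈ digs n :=
        (mem_digs_iff n (digFun n p)).mpr ⟨p, rfl⟩
      have hd := ((pcheck_iff _ _).mp (H ((digFun n p : Fin 10) : Nat) (digFun n p).isLt)).2 hx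
      simp [hmem] at hd
    · intro j hjR
      simp only [Rset, Finset.mem_filter, Finset.mem_univ, true_and] at hjR
      have hd := ((pcheck_iff _ _).mp (H (j : Nat) j.isLt)).1 hjR
      have hmem : (j : Nat) ∈ digs n := by simpa using hd
      rcases (mem_digs_iff n j).mp hmem with ⟨p, hp⟩
      exact Finset.mem_image.mpr ⟨p, Finset.mem_univ p, hp⟩
  · rintro ⟨hA, hR⟩ j hj
    apply (pcheck_iff _ _).mpr
    constructor
    · intro ho
      have hjR : (⟨j, hj⟩ : Fin 10) ∈ Rset s := by
        simp [Rset, ho]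
      rcases Finset.mem_image.mp (hR hjR) with ⟨p, _, hp⟩
      have hmem : (j : Nat) ∈ digs n := (mem_digs_iff n ⟨j, hj⟩).mpr ⟨p, hp⟩
      simpa using hmem
    · intro hx
      simp only [decide_eq_false_iff_not]
      intro hmem
      rcases (mem_digs_iff n ⟨j, hj⟩).mp hmem with ⟨p, hp⟩
      have := hA p
      rw [hp] at this
      simp [Aset] at this
      exact this hx

theorem countP_range_card (N : Nat) (q : Nat → Prop) [DecidablePred q] :
    (List.range N).countP (fun j => decide (q j)) = ((Finset.range N).filter q).card := by
  induction N with
  | zero => simp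
  | succ N ih =>
    rw [List.range_succ, List.countP_append, ih, Finset.range_add_one, Finset.filter_insert]
    by_cases hq : q N
    · rw [if_pos hq, Finset.card_insert_of_notMem (by simp)]
      simp [hq]
    · rw [if_neg hq]
      simp [hq]

theorem digFun_pack (f : Fin 4 → Fin 10) :
    digFun (1000 * (f 0 : Nat) + 100 * (f 1 : Nat) + 10 * (f 2 : Nat) + (f 3 : Nat)) = f := by
  have h0 := (f 0).isLt
  have h1 := (f 1).isLt
  have h2 := (f 2).isLt
  have h3 := (f 3).isLt
  have hd0 : digFun (1000 * (f 0 : Nat) + 100 * (f 1 : Nat) + 10 * (f 2 : Nat) + (f 3 : Nat)) 0 = f 0 :=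
    Fin.ext (by norm_num [digFun]; omega)
  have hd1 : digFun (1000 * (f 0 : Nat) + 100 * (f 1 : Nat) + 10 * (f 2 : Nat) + (f 3 : Nat)) 1 = f 1 :=
    Fin.ext (by norm_num [digFun]; omega)
  have hd2 : digFun (1000 * (f 0 : Nat) + 100 * (f 1 : Nat) + 10 * (f 2 : Nat) + (f 3 : Nat)) 2 = f 2 :=
    Fin.ext (by norm_num [digFun]; omega)
  have hd3 : digFun (1000 * (f 0 : Nat) + 100 * (f 1 : Nat) + 10 * (f 2 : Nat) + (f 3 : Nat)) 3 = f 3 :=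
    Fin.ext (by norm_num [digFun]; omega)
  funext p
  fin_cases p
  · exact hd0
  · exact hd1
  · exact hd2
  · exact hd3

theorem countP_eq_cardF (s : String) :
    (List.range 10000).countP (PnA s)
      = (Finset.univ.filter (fun f : Fin 4 → Fin 10 =>
          (∀ p, f p ∈ Aset s) ∧ Rset s ⊆ Finset.image f Finset.univ)).card := by
  have h0 : PnA s = fun n => decide (PnA s n = true) := by
    funext n
    simp
  rw [h0, countP_range_card 10000 (fun n => PnA s n = true)]
  refine Finset.card_bij' (fun n _ => digFun n)
    (fun f _ => 1000 * (f 0 : Nat) + 100 * (f 1 : Nat) + 10 * (f 2 : Nat) + (f 3 : Nat))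
    ?_ ?_ ?_ ?_
  · intro n hn
    simp only [Finset.mem_filter, Finset.mem_range] at hn
    simp only [Finset.mem_filter, Finset.mem_univ, true_and]
    exact (PnA_iff s n).mp hn.2
  · intro f hf
    simp only [Finset.mem_filter, Finset.mem_univ, true_and] at hf
    have h0 := (f 0).isLt
    have h1 := (f 1).isLt
    have h2 := (f 2).isLt
    have h3 := (f 3).isLt
    have hn : 1000 * (f 0 : Nat) + 100 * (f 1 : Nat) + 10 * (f 2 : Nat) + (f 3 : Nat) < 10000 := by
      omega
    simp only [Finset.mem_filter, Finset.mem_range]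
    refine ⟨hn, (PnA_iff s _).mpr ?_⟩
    rw [digFun_pack f]
    exact hf
  · intro n hn
    simp only [Finset.mem_filter, Finset.mem_range] at hn
    norm_num [digFun]
    omega
  · intro f hf
    exact digFun_pack f

/-! ### the inclusion-exclusion identity -/

theorem card_pi_filter (s : Finset (Fin 10)) :
    (Finset.univ.filter (fun f : Fin 4 → Fin 10 => ∀ p, f p ∈ s)).card = s.card ^ 4 := by
  have he : (Finset.univ.filter (fun f : Fin 4 → Fin 10 => ∀ p, f p ∈ s))
      = Fintype.piFinset (fun _ : Fin 4 => s) := by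
    ext f
    simp [Fintype.mem_piFinset]
  rw [he, Fintype.card_piFinset]
  simp

theorem core_ie (R A : Finset (Fin 10)) (hRA : R ⊆ A) :
    ((Finset.univ.filter (fun f : Fin 4 → Fin 10 =>
        (∀ p, f p ∈ A) ∧ R ⊆ Finset.image f Finset.univ)).card : Int)
      = ∑ k ∈ Finset.range (R.card + 1),
          (-1) ^ k * (R.card.choose k : Int) * ((A.card : Int) - (k : Int)) ^ 4 := by
  have hps : ∑ T ∈ R.powerset, (-1 : Int) ^ T.card * ((A.card : Int) - (T.card : Int)) ^ 4
      = ∑ k ∈ Finset.range (R.card + 1),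
          (-1) ^ k * (R.card.choose k : Int) * ((A.card : Int) - (k : Int)) ^ 4 := by
    rw [Finset.sum_powerset R (fun T => (-1 : Int) ^ T.card * ((A.card : Int) - (T.card : Int)) ^ 4)]
    refine Finset.sum_congr rfl ?_
    intro k _
    rw [Finset.sum_congr rfl (fun T hT => by rw [(Finset.mem_powersetCard.mp hT).2]),
      Finset.sum_const, Finset.card_powersetCard, nsmul_eq_mul]
    ring
  rw [← hps]
  have hT4 : ∀ T ∈ R.powerset, ((A.card : Int) - (T.card : Int)) ^ 4
      = ((Finset.univ.filter (fun f : Fin 4 → Fin 10 => ∀ p, f p ∈ A \ T)).card : Int) := by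
    intro T hT
    have hTA : T ⊆ A := (Finset.mem_powerset.mp hT).trans hRA
    rw [card_pi_filter (A \ T), Finset.card_sdiff, Finset.inter_eq_left.mpr hTA]
    push_cast [Nat.cast_sub (Finset.card_le_card hTA)]
    ring
  have key : ∀ f : Fin 4 → Fin 10,
      ∑ T ∈ R.powerset, (-1 : Int) ^ T.card * (if (∀ p, f p ∈ A \ T) then 1 else 0)
      = (if (∀ p, f p ∈ A) ∧ R ⊆ Finset.image f Finset.univ then 1 else 0) := by
    intro f
    by_cases hA : ∀ p, f p ∈ A
    · have hMR : R \ Finset.image f Finset.univ ⊆ R := Finset.sdiff_subset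
      have hcond : ∀ T ∈ R.powerset,
          ((∀ p, f p ∈ A \ T) ↔ T ⊆ R \ Finset.image f Finset.univ) := by
        intro T hT
        have hTR : T ⊆ R := Finset.mem_powerset.mp hT
        constructor
        · intro hav x hx
          rw [Finset.mem_sdiff]
          refine ⟨hTR hx, ?_⟩
          intro himg
          rcases Finset.mem_image.mp himg with ⟨p, _, hp⟩
          have hpT := (Finset.mem_sdiff.mp (hav p)).2
          exact hpT (hp ▸ hx)
        · intro hTM p
          rw [Finset.mem_sdiff]
          refine ⟨hA p, ?_⟩
          intro hfT
          have hmem := hTM hfT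
          rw [Finset.mem_sdiff] at hmem
          exact hmem.2 (Finset.mem_image.mpr ⟨p, Finset.mem_univ p, rfl⟩)
      calc ∑ T ∈ R.powerset, (-1 : Int) ^ T.card * (if (∀ p, f p ∈ A \ T) then 1 else 0)
          = ∑ T ∈ R.powerset,
              (if T ⊆ R \ Finset.image f Finset.univ then (-1 : Int) ^ T.card else 0) := by
            refine Finset.sum_congr rfl ?_
            intro T hT
            rw [if_congr (hcond T hT) rfl rfl]
            by_cases hc : T ⊆ R \ Finset.image f Finset.univ
            · simp [hc]
            · simp [hc]
        _ = ∑ T ∈ R.powerset.filter (fun T => T ⊆ R \ Finset.image f Finset.univ),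
              (-1 : Int) ^ T.card := (Finset.sum_filter _ _).symm
        _ = ∑ T ∈ (R \ Finset.image f Finset.univ).powerset, (-1 : Int) ^ T.card := by
            congr 1
            ext T
            simp only [Finset.mem_filter, Finset.mem_powerset]
            exact ⟨fun hx => hx.2, fun hx => ⟨hx.trans hMR, hx⟩⟩
        _ = if R \ Finset.image f Finset.univ = ∅ then 1 else 0 :=
            Finset.sum_powerset_neg_one_pow_card
        _ = if (∀ p, f p ∈ A) ∧ R ⊆ Finset.image f Finset.univ then 1 else 0 := by
            rw [if_congr Finset.sdiff_eq_empty_iff_subset rfl rfl]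
            simp [hA]
    · rcases not_forall.mp hA with ⟨p0, hp0⟩
      have hz : ∀ T ∈ R.powerset,
          (-1 : Int) ^ T.card * (if (∀ p, f p ∈ A \ T) then 1 else 0) = 0 := by
        intro T _
        have hnav : ¬ (∀ p, f p ∈ A \ T) := fun hav => hp0 (Finset.mem_sdiff.mp (hav p0)).1
        rw [if_neg hnav, mul_zero]
      rw [Finset.sum_congr rfl hz, Finset.sum_const, smul_zero]
      have hnot : ¬ ((∀ p, f p ∈ A) ∧ R ⊆ Finset.image f Finset.univ) := fun hcon => hp0 (hcon.1 p0)
      simp [hnot]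
  calc ((Finset.univ.filter (fun f : Fin 4 → Fin 10 =>
          (∀ p, f p ∈ A) ∧ R ⊆ Finset.image f Finset.univ)).card : Int)
      = ∑ f : Fin 4 → Fin 10,
          (if (∀ p, f p ∈ A) ∧ R ⊆ Finset.image f Finset.univ then 1 else 0) := by
        rw [Finset.card_filter]
        push_cast
        rfl
    _ = ∑ f : Fin 4 → Fin 10, ∑ T ∈ R.powerset,
          (-1 : Int) ^ T.card * (if (∀ p, f p ∈ A \ T) then 1 else 0) := by
        refine Finset.sum_congr rfl ?_
        intro f _
        exact (key f).symm
    _ = ∑ T ∈ R.powerset, ∑ f : Fin 4 → Fin 10,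
          (-1 : Int) ^ T.card * (if (∀ p, f p ∈ A \ T) then 1 else 0) := Finset.sum_comm
    _ = ∑ T ∈ R.powerset, (-1 : Int) ^ T.card * ((A.card : Int) - (T.card : Int)) ^ 4 := by
        refine Finset.sum_congr rfl ?_
        intro T hT
        rw [← Finset.mul_sum, hT4 T hT]
        congr 1
        rw [Finset.card_filter]
        push_cast
        rfl

/-! ### B's two loops -/

theorem card_range10_filter (q : Nat → Prop) [DecidablePred q] :
    ((Finset.range 10).filter q).card = (Finset.univ.filter (fun j : Fin 10 => q j.val)).card := by
  refine Finset.card_bij'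
    (fun n hn => (⟨n, Finset.mem_range.mp (Finset.mem_filter.mp hn).1⟩ : Fin 10))
    (fun j _ => j.val) ?_ ?_ ?_ ?_
  · intro n hn
    simp only [Finset.mem_filter, Finset.mem_range] at hn
    simp [hn.2]
  · intro j hj
    simp only [Finset.mem_filter, Finset.mem_univ, true_and] at hj
    simp [j.isLt, hj]
  · intro n hn
    rfl
  · intro j hj
    rfl

theorem b_first_loop (s : String) (h : 10 ≤ s.toList.length) :
    (PySem.List.pyRange 0 10 1).foldl
      (fun (st : Int × Int) j =>
        (if PySem.Str.pyGet? s j = some 'o' then st.1 + 1 else st.1,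
         if ¬ PySem.Str.pyGet? s j = some 'x' then st.2 + 1 else st.2)) (0, 0)
      = (((Rset s).card : Int), ((Aset s).card : Int)) := by
  rw [show ((10 : Int)) = ((10 : Nat) : Int) by norm_num, PySem.List.pyRange_zero_natCast,
    List.foldl_map,
    PySem.List.foldl_prod_mk
      (f := fun (r : Int) (k : Nat) => if PySem.Str.pyGet? s (k : Int) = some 'o' then r + 1 else r)
      (g := fun (a : Int) (k : Nat) => if ¬ PySem.Str.pyGet? s (k : Int) = some 'x' then a + 1 else a),
    PySem.List.foldl_ite_add_one, PySem.List.foldl_ite_add_one]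
  have hR : (List.range 10).countP (fun (k : Nat) => decide (PySem.Str.pyGet? s (k : Int) = some 'o'))
      = (Rset s).card := by
    rw [countP_range_card 10 (fun (k : Nat) => PySem.Str.pyGet? s (k : Int) = some 'o'),
      card_range10_filter]
    congr 1
    apply Finset.filter_congr
    intro j _
    rw [pyGet?_cls s h j.val j.isLt]
    simp
  have hA : (List.range 10).countP (fun (k : Nat) => decide (¬ PySem.Str.pyGet? s (k : Int) = some 'x'))
      = (Aset s).card := by
    rw [countP_range_card 10 (fun (k : Nat) => ¬ PySem.Str.pyGet? s (k : Int) = some 'x'),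
      card_range10_filter]
    congr 1
    apply Finset.filter_congr
    intro j _
    rw [pyGet?_cls s h j.val j.isLt]
    simp
  rw [hR, hA]
  simp

theorem bloop (rc : Nat) (a : Int) (m : Nat) (hm : m ≤ rc + 1) :
    (List.range m).foldl (fun (st : Int × Int × Int) (k : Nat) =>
        (st.1 + st.2.1 * st.2.2 * (a - (k : Int)) ^ (4 : Nat),
         -st.2.1,
         PySem.Int.floordiv (st.2.2 * ((rc : Int) - (k : Int))) ((k : Int) + 1))) (0, 1, 1)
      = (∑ k ∈ Finset.range m, (-1) ^ k * (rc.choose k : Int) * (a - (k : Int)) ^ 4,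
         (-1) ^ m, (rc.choose m : Int)) := by
  induction m with
  | zero => simp
  | succ m ih =>
    have hm' : m ≤ rc := by omega
    rw [List.range_succ, List.foldl_append, ih (by omega)]
    simp only [List.foldl_cons, List.foldl_nil]
    refine Prod.ext ?_ (Prod.ext ?_ ?_)
    · simp only
      rw [Finset.sum_range_succ]
    · simp only
      rw [pow_succ]
      ring
    · simp only
      have hsub : (rc : Int) - (m : Int) = ((rc - m : Nat) : Int) := by
        push_cast [Nat.cast_sub hm']
        ring
      have hcast : ((m : Int) + 1) = (((m + 1 : Nat)) : Int) := by push_cast; ring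
      rw [hsub, hcast, ← Nat.cast_mul, PySem.Int.floordiv_natCast,
        ← Nat.choose_succ_right_eq, Nat.mul_div_cancel _ (Nat.succ_pos m)]

theorem solve_alt_eq (s : String) (h : 10 ≤ s.toList.length) :
    solve_alt s = ∑ k ∈ Finset.range ((Rset s).card + 1),
      (-1) ^ k * ((Rset s).card.choose k : Int) * (((Aset s).card : Int) - (k : Int)) ^ 4 := by
  simp only [solve_alt]
  rw [b_first_loop s h]
  simp only
  rw [show (((Rset s).card : Int) + 1) = (((Rset s).card + 1 : Nat) : Int) by push_cast; ring,
    PySem.List.pyRange_zero_natCast, List.foldl_map]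
  rw [bloop (Rset s).card ((Aset s).card : Int) ((Rset s).card + 1) (le_refl _)]

theorem Rset_subset_Aset (s : String) : Rset s ⊆ Aset s := by
  intro j hj
  simp [Rset, Aset] at *
  intro hx
  rw [hj] at hx
  exact absurd hx (by decide)

-- ===== VERDICT (by name: the statement is the Claim_ definition above) =====
theorem solve_spec : Claim_equal_solve := by
  intro s _ hpre
  unfold Spec_solve
  have h : 10 ≤ s.toList.length := hpre
  rw [solve_eq_countP s h, countP_eq_cardF s, solve_alt_eq s h]
  exact core_ie (Rset s) (Aset s) (Rset_subset_Aset s)
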